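-- pv_equiv track=rewrite | github.com/johndriguess/2048 | logic.py | paraDireita
-- ===== SOURCE A (Python) =====
-- def paraDireita(matriz):
--     shiftRight(matriz)
--     for i in range(4):
--         for j in range(3, 0, -1):
--             if matriz[i][j] == matriz[i][j - 1] and matriz[i][j] != 0:
--                 matriz[i][j] *= 2
--                 matriz[i][j - 1] = 0
--                 j = 0
--
--     # final shift
--     shiftRight(matriz)
--     return matriz
--
-- def shiftRight(matriz):
--     for i in range(4):
--         nums, count = [], 0
--         for j in range(4):
--             if matriz[i][j] != 0:
--                 nums.append(matriz[i][j])
--                 count += 1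
--         matriz[i] = [0] * (4 - count)
--         matriz[i].extend(nums)
-- ===== SOURCE B (Python) =====
-- def paraDireita(matriz):
--     for i in range(4):
--         nums = [x for x in matriz[i][:4] if x != 0]
--         merged = []
--         k = len(nums) - 1
--         while k >= 0:
--             if k > 0 and nums[k] == nums[k - 1]:
--                 merged.append(nums[k] * 2)
--                 k -= 2
--             else:
--                 merged.append(nums[k])
--                 k -= 1
--         merged.reverse()
--         matriz[i] = [0] * (4 - len(merged)) + merged
--     return matriz
-- ===== Notes on version B (the rewrite author's own statement) =====
-- stated objective: simpler
-- what changed: Replaces A's three passes per row (shift, in-place adjacent merge over the padded row, shift again) with a single consolidated pass: collect the non-zero entries, merge adjacent equal survivors scanning right-to-left, then left-pad with zeros.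
import Mathlib
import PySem

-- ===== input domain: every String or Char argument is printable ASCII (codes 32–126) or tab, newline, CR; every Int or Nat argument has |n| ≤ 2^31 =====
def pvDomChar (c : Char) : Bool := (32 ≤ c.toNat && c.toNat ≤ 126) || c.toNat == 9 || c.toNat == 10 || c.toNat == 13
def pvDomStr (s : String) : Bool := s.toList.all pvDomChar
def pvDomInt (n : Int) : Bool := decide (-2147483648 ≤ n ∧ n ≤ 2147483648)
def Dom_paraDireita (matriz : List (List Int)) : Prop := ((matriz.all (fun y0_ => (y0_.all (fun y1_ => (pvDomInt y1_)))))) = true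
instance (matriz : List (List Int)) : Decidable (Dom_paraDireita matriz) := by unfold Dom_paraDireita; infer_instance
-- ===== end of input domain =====

-- B replaces A's shift/merge/shift three-pass row scheme with one pass per row (simpler);
-- A mutates matriz in place, B performs the same row reassignments; equivalence here is about the return value.

-- ===== PORT A =====
-- shiftRight's body for one row: collect the non-zero entries of cells 0..3, pad with zeros
def pvShiftRow (row : List Int) : List Int :=
  let nums := (PySem.List.pyRange 0 4 1).foldl (fun acc j =>
      if PySem.List.pyGetD row j 0 ≠ 0 then acc ++ [PySem.List.pyGetD row j 0] else acc) []
  List.replicate (4 - nums.length) 0 ++ nums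

-- shiftRight: for i in range(4): matriz[i] = <shifted row>
def pvShift (m : List (List Int)) : List (List Int) :=
  (PySem.List.pyRange 0 4 1).foldl
    (fun m i => PySem.List.pySetD m i (pvShiftRow (PySem.List.pyGetD m i []))) m

-- the inner 'for j in range(3, 0, -1)' merge loop on one row (the 'j = 0' in A does not break the loop)
def pvMergeRow (row : List Int) : List Int :=
  (PySem.List.pyRange 3 0 (-1)).foldl (fun r j =>
    if PySem.List.pyGetD r j 0 = PySem.List.pyGetD r (j - 1) 0 ∧ PySem.List.pyGetD r j 0 ≠ 0 then
      PySem.List.pySetD (PySem.List.pySetD r j (PySem.List.pyGetD r j 0 * 2)) (j - 1) 0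
    else r) row

def paraDireita (matriz : List (List Int)) : List (List Int) :=
  let m1 := pvShift matriz
  let m2 := (PySem.List.pyRange 0 4 1).foldl
    (fun m i => PySem.List.pySetD m i (pvMergeRow (PySem.List.pyGetD m i []))) m1
  pvShift m2

-- ===== PORT B =====
-- the while loop scanning k from high to low over nums, appending into merged (kept reversed here)
def pvMergeRev : List Int → List Int
  | [] => []
  | [a] => [a]
  | a :: b :: rest => if a = b then a * 2 :: pvMergeRev rest else a :: pvMergeRev (b :: rest)

-- one row of B: nums = [x for x in row[:4] if x != 0]; merge from the right; left-pad
def pvRowB (row : List Int) : List Int :=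
  let nums := (row.take 4).filter (· ≠ 0)   -- row[:4] with a nonneg literal bound is List.take 4
  let merged := (pvMergeRev nums.reverse).reverse
  List.replicate (4 - merged.length) 0 ++ merged

def paraDireita_alt (matriz : List (List Int)) : List (List Int) :=
  (List.range 4).foldl (fun m i => m.set i (pvRowB (m.getD i []))) matriz

-- ===== PRECONDITION & SPEC =====
-- A indexes matriz[i][j] for i,j in range(4): it raises IndexError unless there are at least
-- 4 rows and each of the first 4 rows has at least 4 cells; exactly those inputs are excluded.
def Pre_paraDireita (matriz : List (List Int)) : Prop :=
  4 ≤ matriz.length ∧ ∀ r ∈ matriz.take 4, 4 ≤ r.length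
instance (matriz : List (List Int)) : Decidable (Pre_paraDireita matriz) := by
  unfold Pre_paraDireita; infer_instance
def pvWitness_paraDireita : List (List Int) := [[2,2,2,2],[0,0,0,0],[4,0,4,2],[0,2,0,2]]

def Spec_paraDireita (matriz : List (List Int)) (out : List (List Int)) : Prop := out = paraDireita_alt matriz
instance (matriz : List (List Int)) (out : List (List Int)) : Decidable (Spec_paraDireita matriz out) := by unfold Spec_paraDireita; infer_instance

-- ===== CLAIM (what is proved, stated in full; the proofs are below) =====
def Claim_equal_paraDireita : Prop := ∀ (matriz : List (List Int)), Dom_paraDireita matriz → Pre_paraDireita matriz → Spec_paraDireita matriz (paraDireita matriz)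

-- ===== LEMMAS AND PROOFS =====
theorem gd0 {α : Type} (x0 x1 x2 x3 : α) (t : List α) (d : α) : PySem.List.pyGetD (x0::x1::x2::x3::t) 0 d = x0 := by
  simp [PySem.List.pyGetD, PySem.List.pyGet?, PySem.List.pyIdx?]; rw [if_pos (by omega)]; simp
theorem gd1 {α : Type} (x0 x1 x2 x3 : α) (t : List α) (d : α) : PySem.List.pyGetD (x0::x1::x2::x3::t) 1 d = x1 := by
  simp [PySem.List.pyGetD, PySem.List.pyGet?, PySem.List.pyIdx?]; rw [if_pos (by omega)]; simp
theorem gd2 {α : Type} (x0 x1 x2 x3 : α) (t : List α) (d : α) : PySem.List.pyGetD (x0::x1::x2::x3::t) 2 d = x2 := by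
  simp [PySem.List.pyGetD, PySem.List.pyGet?, PySem.List.pyIdx?]; rw [if_pos (by omega)]; simp
theorem gd3 {α : Type} (x0 x1 x2 x3 : α) (t : List α) (d : α) : PySem.List.pyGetD (x0::x1::x2::x3::t) 3 d = x3 := by
  simp [PySem.List.pyGetD, PySem.List.pyGet?, PySem.List.pyIdx?]; rw [if_pos (by omega)]; simp
theorem sd0 {α : Type} (x0 x1 x2 x3 v : α) (t : List α) : PySem.List.pySetD (x0::x1::x2::x3::t) 0 v = v::x1::x2::x3::t := by
  simp [PySem.List.pySetD, PySem.List.pySet?, PySem.List.pyIdx?]; rw [if_pos (by omega)]; simp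
theorem sd1 {α : Type} (x0 x1 x2 x3 v : α) (t : List α) : PySem.List.pySetD (x0::x1::x2::x3::t) 1 v = x0::v::x2::x3::t := by
  simp [PySem.List.pySetD, PySem.List.pySet?, PySem.List.pyIdx?]; rw [if_pos (by omega)]; simp [List.set]
theorem sd2 {α : Type} (x0 x1 x2 x3 v : α) (t : List α) : PySem.List.pySetD (x0::x1::x2::x3::t) 2 v = x0::x1::v::x3::t := by
  simp [PySem.List.pySetD, PySem.List.pySet?, PySem.List.pyIdx?]; rw [if_pos (by omega)]; simp [List.set]
theorem sd3 {α : Type} (x0 x1 x2 x3 v : α) (t : List α) : PySem.List.pySetD (x0::x1::x2::x3::t) 3 v = x0::x1::x2::v::t := by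
  simp [PySem.List.pySetD, PySem.List.pySet?, PySem.List.pyIdx?]; rw [if_pos (by omega)]; simp [List.set]
theorem rng04 : PySem.List.pyRange 0 4 1 = [0,1,2,3] := by decide
theorem rng31 : PySem.List.pyRange 3 0 (-1) = [3,2,1] := by decide

theorem mergeRow4 (p q r s : Int) : pvMergeRow [p,q,r,s] =
    if s = r ∧ s ≠ 0 then
      (if q = p ∧ q ≠ 0 then [0,q*2,0,s*2] else [p,q,0,s*2])
    else if r = q ∧ r ≠ 0 then [p,0,r*2,s]
    else if q = p ∧ q ≠ 0 then [0,q*2,r,s] else [p,q,r,s] := by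
  simp only [pvMergeRow, rng31, List.foldl, gd0, gd1, gd2, gd3, sd0, sd1, sd2, sd3]
  norm_num
  split_ifs <;> simp_all [gd0, gd1, gd2, gd3, sd0, sd1, sd2, sd3]

theorem shiftRow4 (a b c d : Int) (t : List Int) :
    pvShiftRow (a :: b :: c :: d :: t) =
      (let nums := [a,b,c,d].filter (· ≠ 0)
       List.replicate (4 - nums.length) 0 ++ nums) := by
  simp only [pvShiftRow, rng04, List.foldl, gd0, gd1, gd2, gd3]
  by_cases ha : a = 0 <;> by_cases hb : b = 0 <;> by_cases hc : c = 0 <;> by_cases hd : d = 0 <;>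
    simp [ha, hb, hc, hd, List.filter, List.replicate]
set_option maxHeartbeats 4000000 in
theorem pvRow_eq (a b c d : Int) (t : List Int) :
    pvShiftRow (pvMergeRow (pvShiftRow (a :: b :: c :: d :: t))) = pvRowB (a :: b :: c :: d :: t) := by
  by_cases ha : a = 0 <;> by_cases hb : b = 0 <;> by_cases hc : c = 0 <;> by_cases hd : d = 0 <;>
    simp [shiftRow4, mergeRow4, pvRowB, pvMergeRev, ha, hb, hc, hd, List.filter, List.replicate] <;>
    split_ifs <;> simp_all [shiftRow4, List.filter, List.replicate] <;> split_ifs <;> simp_all <;> omega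

theorem ex4 {α : Type} (r : List α) (h : 4 ≤ r.length) :
    ∃ x0 x1 x2 x3 t, r = x0 :: x1 :: x2 :: x3 :: t := by
  match r with
  | x0 :: x1 :: x2 :: x3 :: t => exact ⟨x0, x1, x2, x3, t, rfl⟩
  | [] | [_] | [_,_] | [_,_,_] => simp at h

-- ===== VERDICT (by name: the statement is the Claim_ definition above) =====
set_option maxHeartbeats 2000000 in
theorem paraDireita_spec : Claim_equal_paraDireita := by
  intro matriz _ hpre
  obtain ⟨hlen, hrows⟩ := hpre
  obtain ⟨R0, R1, R2, R3, rest, rfl⟩ := ex4 matriz hlen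
  obtain ⟨a0, b0, c0, d0, t0, rfl⟩ := ex4 R0 (hrows _ (by simp))
  obtain ⟨a1, b1, c1, d1, t1, rfl⟩ := ex4 R1 (hrows _ (by simp))
  obtain ⟨a2, b2, c2, d2, t2, rfl⟩ := ex4 R2 (hrows _ (by simp))
  obtain ⟨a3, b3, c3, d3, t3, rfl⟩ := ex4 R3 (hrows _ (by simp))
  show paraDireita _ = paraDireita_alt _
  simp only [paraDireita, paraDireita_alt, pvShift, rng04, List.range_succ, List.range_zero,
    List.nil_append, List.cons_append, List.foldl_cons, List.foldl_nil,
    gd0, gd1, gd2, gd3, sd0, sd1, sd2, sd3, List.getD, List.set, List.getElem?_cons_zero,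
    List.getElem?_cons_succ, Option.getD_some, pvRow_eq]
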